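-- pv_equiv track=rewrite | github.com/poojakose/CodingBat | sum67.py | Msum67
-- ===== SOURCE A (Python) =====
-- def Msum67(nums):
--   flag=False
--   sum=0
--   for num in nums:
--     if(num==6):
--         flag=True
--         continue
--     if(num==7 and flag is True):
--         flag=False
--         continue
--     if(flag is False):
--        sum+=num
--   return sum
-- ===== SOURCE B (Python) =====
-- def Msum67(nums):
--   total = 0
--   it = iter(nums)
--   for num in it:
--     if num == 6:
--       for inner in it:
--         if inner == 7:
--           break
--       continue
--     total += num
--   return total
-- ===== Notes on version B (the rewrite author's own statement) =====
-- stated objective: alternative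
-- what changed: Replaced the persistent boolean flag state machine with nested iterator consumption: on a 6, an inner loop drains the iterator up to and including the closing 7.
import Mathlib
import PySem

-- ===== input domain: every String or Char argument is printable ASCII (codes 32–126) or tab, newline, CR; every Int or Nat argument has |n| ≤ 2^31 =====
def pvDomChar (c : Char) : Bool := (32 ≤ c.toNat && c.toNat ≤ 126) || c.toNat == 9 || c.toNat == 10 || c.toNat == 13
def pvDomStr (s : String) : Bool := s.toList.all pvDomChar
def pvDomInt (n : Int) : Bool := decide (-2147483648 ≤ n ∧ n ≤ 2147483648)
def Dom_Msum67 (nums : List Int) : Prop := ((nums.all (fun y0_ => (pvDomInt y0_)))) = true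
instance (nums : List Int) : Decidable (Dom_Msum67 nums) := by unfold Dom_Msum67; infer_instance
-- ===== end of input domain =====

-- B replaces A's persistent boolean-flag state machine by nested iterator consumption
-- (an inner loop drains the 6…7 region); objective: alternative decomposition, same cost.

-- ===== PORT A =====
-- A's loop: state (flag, sum), branches in source order.
def Msum67Loop (l : List Int) (flag : Bool) (sum : Int) : Int :=
  match l with
  | [] => sum
  | num :: t =>
    if num == 6 then Msum67Loop t true sum
    else if num == 7 && flag then Msum67Loop t false sum
    else if flag == false then Msum67Loop t flag (sum + num)
    else Msum67Loop t flag sum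

def Msum67 (nums : List Int) : Int := Msum67Loop nums false 0

-- ===== PORT B =====
-- B's inner loop: consume iterator elements until (and including) a 7.
def Msum67Drain (l : List Int) : List Int :=
  match l with
  | [] => []
  | inner :: t => if inner == 7 then t else Msum67Drain t

-- B's outer loop over the remaining iterator.
def Msum67AltLoop (l : List Int) (total : Int) : Int :=
  match l with
  | [] => total
  | num :: t =>
    if num == 6 then Msum67AltLoop (Msum67Drain t) total
    else Msum67AltLoop t (total + num)
  termination_by l.length
  decreasing_by
    · simpa using Nat.lt_succ_of_le (by
        induction t with
        | nil => simp [Msum67Drain]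
        | cons a t ih =>
          simp only [Msum67Drain]
          split
          · simp
          · exact le_trans ih (Nat.le_succ _))
    · simp

def Msum67_alt (nums : List Int) : Int := Msum67AltLoop nums 0

-- ===== PRECONDITION & SPEC =====
def Spec_Msum67 (nums : List Int) (out : Int) : Prop := out = Msum67_alt nums
instance (nums : List Int) (out : Int) : Decidable (Spec_Msum67 nums out) := by unfold Spec_Msum67; infer_instance

-- ===== CLAIM (what is proved, stated in full; the proofs are below) =====
def Claim_equal_Msum67 : Prop := ∀ (nums : List Int), Dom_Msum67 nums → Spec_Msum67 nums (Msum67 nums)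

-- ===== LEMMAS AND PROOFS =====
theorem Msum67Loop_eq (l : List Int) : ∀ s : Int,
    Msum67Loop l false s = Msum67AltLoop l s ∧
    Msum67Loop l true s = Msum67AltLoop (Msum67Drain l) s := by
  induction l with
  | nil => intro s; simp [Msum67Loop, Msum67AltLoop, Msum67Drain]
  | cons n t ih =>
    intro s
    constructor
    · by_cases h6 : n = 6
      · simp [Msum67Loop, Msum67AltLoop, h6, (ih s).2]
      · simp [Msum67Loop, Msum67AltLoop, h6, (ih (s + n)).1]
    · by_cases h6 : n = 6
      · simp [Msum67Loop, Msum67Drain, h6, (ih s).2]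
      · by_cases h7 : n = 7
        · simp [Msum67Loop, Msum67Drain, h7, (ih s).1]
        · simp [Msum67Loop, Msum67Drain, h6, h7, (ih s).2]

-- ===== VERDICT (by name: the statement is the Claim_ definition above) =====
theorem Msum67_spec : Claim_equal_Msum67 := by
  intro nums _
  unfold Spec_Msum67 Msum67 Msum67_alt
  exact (Msum67Loop_eq nums 0).1
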